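-- pv_equiv track=rewrite | github.com/PedroMTQ/data_integration_pipeline_streamlit | src/data_integration_pipeline/gold/io/postgres_client.py | _split_schema_statements
-- ===== SOURCE A (Python) =====
-- def _split_schema_statements(schema_sql: str) -> list[str]:
--     """Split schema SQL into statements by semicolon, ignoring semicolons inside comments or string literals."""
--     statements = []
--     current: list[str] = []
--     i = 0
--     n = len(schema_sql)
--     in_single = False  # inside '...' string
--     in_double = False  # inside "..." identifier
--     in_comment = False  # after -- to EOL
--     while i < n:
--         c = schema_sql[i]
--         if in_comment:
--             if c == '\n':
--                 in_comment = False
--                 current.append(c)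
--             i += 1
--             continue
--         if in_single:
--             current.append(c)
--             if c == "'":
--                 if i + 1 < n and schema_sql[i + 1] == "'":
--                     current.append("'")
--                     i += 1
--                 else:
--                     in_single = False
--             i += 1
--             continue
--         if in_double:
--             current.append(c)
--             if c == '"':
--                 if i + 1 < n and schema_sql[i + 1] == '"':
--                     current.append('"')
--                     i += 1
--                 else:
--                     in_double = False
--             i += 1
--             continue
--         if c == '-' and i + 1 < n and schema_sql[i + 1] == '-':
--             in_comment = True
--             i += 2
--             continue
--         if c == "'":
--             in_single = True
--             current.append(c)
--             i += 1
--             continue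
--         if c == '"':
--             in_double = True
--             current.append(c)
--             i += 1
--             continue
--         if c == ';':
--             stmt = ''.join(current).strip()
--             if stmt:
--                 statements.append(stmt)
--             current = []
--             i += 1
--             continue
--         current.append(c)
--         i += 1
--     stmt = ''.join(current).strip()
--     if stmt:
--         statements.append(stmt)
--     return statements
-- ===== SOURCE B (Python) =====
-- import re
--
-- _TOKEN = re.compile(r"""'(?:[^']|'')*'?|"(?:[^"]|"")*"?|--[^\n]*|;|[\s\S]""")
--
-- def _split_schema_statements(schema_sql: str) -> list[str]:
--     """Split schema SQL into statements by semicolon, ignoring semicolons inside comments or string literals."""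
--     statements = []
--     buf: list[str] = []
--     for m in _TOKEN.finditer(schema_sql):
--         tok = m.group()
--         if tok == ';':
--             stmt = ''.join(buf).strip()
--             if stmt:
--                 statements.append(stmt)
--             buf = []
--         elif tok.startswith('--'):
--             pass  # drop comment text; its newline is the next token and is kept
--         else:
--             buf.append(tok)
--     stmt = ''.join(buf).strip()
--     if stmt:
--         statements.append(stmt)
--     return statements
-- ===== Notes on version B (the rewrite author's own statement) =====
-- stated objective: idiomatic
-- what changed: Replaced A's five-flag character-by-character state machine with a single compiled regex alternation (string literal | quoted identifier | line comment | semicolon | any char) iterated with re.finditer, plus a small per-token loop that buffers text, drops comments and splits on semicolon tokens.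
import Mathlib
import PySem

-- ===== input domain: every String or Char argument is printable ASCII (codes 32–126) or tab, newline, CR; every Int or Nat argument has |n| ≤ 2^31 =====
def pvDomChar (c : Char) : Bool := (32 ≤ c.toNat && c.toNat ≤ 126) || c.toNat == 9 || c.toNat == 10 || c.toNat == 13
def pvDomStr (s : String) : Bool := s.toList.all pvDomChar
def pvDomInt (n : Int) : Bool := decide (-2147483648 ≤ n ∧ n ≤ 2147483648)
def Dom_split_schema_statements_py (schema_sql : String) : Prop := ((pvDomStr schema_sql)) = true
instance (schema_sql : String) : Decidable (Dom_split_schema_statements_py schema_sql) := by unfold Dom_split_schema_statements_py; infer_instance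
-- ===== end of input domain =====

-- B replaces A's five-flag character state machine by a tokenizer (regex alternation:
-- quoted string / comment / ';' / any char) followed by a per-token fold; objective: idiomatic.

-- ===== PORT A =====
-- character-by-character state machine, one step per Python loop iteration
def pvALoop : List Char → List String → List Char → Bool → Bool → Bool → List String
  | [], statements, current, _, _, _ =>
      let stmt := PySem.Str.strip (String.ofList current)
      if stmt ≠ "" then statements ++ [stmt] else statements
  | c :: rest, statements, current, in_single, in_double, in_comment =>
      if in_comment then
        if c = '\n' then pvALoop rest statements (current ++ [c]) in_single in_double false
        else pvALoop rest statements current in_single in_double in_comment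
      else if in_single then
        if c = '\'' then
          if rest.head? = some '\'' then
            pvALoop rest.tail statements (current ++ [c] ++ ['\'']) in_single in_double in_comment
          else
            pvALoop rest statements (current ++ [c]) false in_double in_comment
        else pvALoop rest statements (current ++ [c]) in_single in_double in_comment
      else if in_double then
        if c = '"' then
          if rest.head? = some '"' then
            pvALoop rest.tail statements (current ++ [c] ++ ['"']) in_single in_double in_comment
          else
            pvALoop rest statements (current ++ [c]) in_single false in_comment
        else pvALoop rest statements (current ++ [c]) in_single in_double in_comment
      else if c = '-' ∧ rest.head? = some '-' then
        pvALoop rest.tail statements current in_single in_double true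
      else if c = '\'' then
        pvALoop rest statements (current ++ [c]) true in_double in_comment
      else if c = '"' then
        pvALoop rest statements (current ++ [c]) in_single true in_comment
      else if c = ';' then
        let stmt := PySem.Str.strip (String.ofList current)
        pvALoop rest (if stmt ≠ "" then statements ++ [stmt] else statements) [] in_single in_double in_comment
      else
        pvALoop rest statements (current ++ [c]) in_single in_double in_comment
  termination_by l => l.length
  decreasing_by all_goals (simp [List.length_tail]; try omega)

def split_schema_statements_py (schema_sql : String) : List String :=
  pvALoop schema_sql.toList [] [] false false false

-- ===== PORT B =====
-- body of the regex token ⟨q⟩(?:[^⟨q⟩]|⟨q⟩⟨q⟩)*⟨q⟩? after the opening quote: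
-- returns (matched chars, rest of the input)
def pvScanQ (q : Char) : List Char → List Char × List Char
  | [] => ([], [])
  | c :: cs =>
    if c = q then
      match cs with
      | d :: rest =>
          if d = q then
            (c :: d :: (pvScanQ q rest).1, (pvScanQ q rest).2)
          else ([c], cs)
      | [] => ([c], [])
    else
      (c :: (pvScanQ q cs).1, (pvScanQ q cs).2)

theorem pvScanQ_len (q : Char) : ∀ cs : List Char, (pvScanQ q cs).2.length ≤ cs.length := by
  intro cs
  fun_induction pvScanQ q cs <;> simp_all <;> omega

inductive PvTok
  | text : List Char → PvTok
  | semi : PvTok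

-- re.finditer over the alternation: string literal | comment (dropped, newline kept) | ';' | any char
def pvTokenize : List Char → List PvTok
  | [] => []
  | c :: cs =>
    if c = '\'' then
      PvTok.text (c :: (pvScanQ '\'' cs).1) :: pvTokenize (pvScanQ '\'' cs).2
    else if c = '"' then
      PvTok.text (c :: (pvScanQ '"' cs).1) :: pvTokenize (pvScanQ '"' cs).2
    else if c = '-' ∧ cs.head? = some '-' then
      pvTokenize (cs.tail.dropWhile (· ≠ '\n'))
    else if c = ';' then
      PvTok.semi :: pvTokenize cs
    else
      PvTok.text [c] :: pvTokenize cs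
  termination_by l => l.length
  decreasing_by
  · have := pvScanQ_len '\'' cs; simp; omega
  · have := pvScanQ_len '"' cs; simp; omega
  · have := List.length_dropWhile_le (p := fun x => decide (x ≠ '\n')) (l := cs.tail)
    have h2 : cs.tail.length ≤ cs.length := by simp [List.length_tail]
    simp only [List.length_cons]; omega
  · simp
  · simp

-- the loop body of B: ';' flushes the stripped buffer, text tokens are appended verbatim
def pvEmit : List PvTok → List String → List Char → List String
  | [], statements, buf =>
      let stmt := PySem.Str.strip (String.ofList buf)
      if stmt ≠ "" then statements ++ [stmt] else statements
  | PvTok.semi :: ts, statements, buf =>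
      let stmt := PySem.Str.strip (String.ofList buf)
      pvEmit ts (if stmt ≠ "" then statements ++ [stmt] else statements) []
  | PvTok.text t :: ts, statements, buf => pvEmit ts statements (buf ++ t)

def split_schema_statements_py_alt (schema_sql : String) : List String :=
  pvEmit (pvTokenize schema_sql.toList) [] []

-- ===== PRECONDITION & SPEC =====
def Spec_split_schema_statements_py (schema_sql : String) (out : List String) : Prop := out = split_schema_statements_py_alt schema_sql
instance (schema_sql : String) (out : List String) : Decidable (Spec_split_schema_statements_py schema_sql out) := by unfold Spec_split_schema_statements_py; infer_instance

-- ===== CLAIM (what is proved, stated in full; the proofs are below) =====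
def Claim_equal_split_schema_statements_py : Prop := ∀ (schema_sql : String), Dom_split_schema_statements_py schema_sql → Spec_split_schema_statements_py schema_sql (split_schema_statements_py schema_sql)

-- ===== LEMMAS AND PROOFS =====

-- A's in_single state consumes exactly the chars of B's string-body token and appends them
theorem pvA_single : ∀ (cs : List Char) (stmts : List String) (cur : List Char),
    pvALoop cs stmts cur true false false =
      pvALoop (pvScanQ '\'' cs).2 stmts (cur ++ (pvScanQ '\'' cs).1) false false false := by
  intro cs
  fun_induction pvScanQ '\'' cs <;> intro stmts cur <;>
    simp_all [pvALoop, List.append_assoc]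

theorem pvA_double : ∀ (cs : List Char) (stmts : List String) (cur : List Char),
    pvALoop cs stmts cur false true false =
      pvALoop (pvScanQ '"' cs).2 stmts (cur ++ (pvScanQ '"' cs).1) false false false := by
  intro cs
  fun_induction pvScanQ '"' cs <;> intro stmts cur <;>
    simp_all [pvALoop, List.append_assoc]

theorem pvA_comment : ∀ (cs : List Char) (stmts : List String) (cur : List Char),
    pvALoop cs stmts cur false false true =
      pvALoop (cs.dropWhile (· ≠ '
')) stmts cur false false false := by
  intro cs
  induction cs with
  | nil => intro stmts cur; simp [pvALoop]
  | cons c rest ih =>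
      intro stmts cur
      by_cases h : c = '\n'
      · subst h; simp [pvALoop, List.dropWhile]
      · simp [pvALoop, h, List.dropWhile, ih]

theorem pvMain : ∀ (cs : List Char) (stmts : List String) (cur : List Char),
    pvALoop cs stmts cur false false false = pvEmit (pvTokenize cs) stmts cur := by
  intro cs
  fun_induction pvTokenize cs <;> intro stmts cur <;>
    simp_all [pvALoop, pvEmit, pvA_single, pvA_double, pvA_comment, List.append_assoc]

-- ===== VERDICT (by name: the statement is the Claim_ definition above) =====
theorem split_schema_statements_py_spec : Claim_equal_split_schema_statements_py := by
  intro s _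
  unfold Spec_split_schema_statements_py split_schema_statements_py split_schema_statements_py_alt
  exact pvMain s.toList [] []
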